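-- pv_equiv track=rewrite | github.com/santiagommejia/Solutions-CCC | chapter_4/1-route_between_nodes.py | routeExistsBFS
-- ===== SOURCE A (Python) =====
-- from collections import deque
--
-- def routeExistsBFS(graph, nodeA, nodeB):
--   queue = deque([])
--   queue.append(nodeA)
--   visitedSet = set()
--   while len(queue) > 0:
--     node = queue.popleft()
--     if node == nodeB:
--       return True
--     if not node in visitedSet:
--       if node in graph:
--         queue.extend(graph[node])
--     visitedSet.add(node)
--   return False
-- ===== SOURCE B (Python) =====
-- def routeExistsBFS(graph, nodeA, nodeB):
--   # Fixpoint saturation: repeatedly sweep the adjacency dict, adding the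
--   # children of every already-reached key, until a full sweep adds nothing;
--   # then answer by membership of nodeB in the saturated reachable set.
--   reachable = {nodeA}
--   changed = True
--   while changed:
--     changed = False
--     for node in graph:
--       if node in reachable:
--         for child in graph[node]:
--           if child not in reachable:
--             reachable.add(child)
--             changed = True
--   return nodeB in reachable
-- ===== Notes on version B (the rewrite author's own statement) =====
-- stated objective: alternative
-- what changed: A's FIFO-queue BFS with an early return when nodeB is popped is replaced by a fixpoint saturation that repeatedly sweeps the adjacency dict adding children of reached keys until a sweep changes nothing, then tests nodeB's membership in the saturated set.
import Mathlib
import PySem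

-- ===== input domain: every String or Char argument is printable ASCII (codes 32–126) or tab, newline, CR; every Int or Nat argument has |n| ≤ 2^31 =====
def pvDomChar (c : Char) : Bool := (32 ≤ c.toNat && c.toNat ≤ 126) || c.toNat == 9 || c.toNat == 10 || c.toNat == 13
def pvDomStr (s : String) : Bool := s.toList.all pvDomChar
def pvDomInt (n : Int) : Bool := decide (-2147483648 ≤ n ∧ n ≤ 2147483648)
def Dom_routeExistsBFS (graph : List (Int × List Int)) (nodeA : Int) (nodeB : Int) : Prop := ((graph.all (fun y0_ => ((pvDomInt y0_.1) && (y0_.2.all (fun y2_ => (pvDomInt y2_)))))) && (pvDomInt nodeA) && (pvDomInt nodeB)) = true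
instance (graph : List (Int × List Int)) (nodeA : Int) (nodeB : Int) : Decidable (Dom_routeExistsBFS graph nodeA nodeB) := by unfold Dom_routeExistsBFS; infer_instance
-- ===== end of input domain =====

-- B replaces A's early-returning FIFO BFS by a fixpoint saturation: repeated sweeps over the
-- adjacency list add children of reached keys until nothing changes; alternative decomposition.

-- Helper lemmas cited by the ports' termination proofs.
theorem pvFilterLenLe {α : Type} (l : List α) (p q : α → Bool) (h : ∀ a, q a = true → p a = true) :
    (l.filter q).length ≤ (l.filter p).length := by
  induction l with
  | nil => simp
  | cons a l ih =>
    by_cases hq : q a = true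
    · simp only [List.filter_cons, hq, h a hq, if_true, List.length_cons]
      omega
    · simp only [List.filter_cons, Bool.not_eq_true] at hq ⊢
      rcases hp : p a <;> simp only [hq, Bool.false_eq_true, if_false, if_true,
        List.length_cons] <;> omega

theorem pvFilterLenLt {α : Type} (l : List α) (p q : α → Bool) (h : ∀ a, q a = true → p a = true)
    (x : α) (hx : x ∈ l) (hpx : p x = true) (hqx : q x = false) :
    (l.filter q).length < (l.filter p).length := by
  induction l with
  | nil => simp at hx
  | cons a l ih =>
    by_cases hq : q a = true
    · have hax : a ≠ x := fun he => by rw [he, hqx] at hq; exact absurd hq (by simp)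
      have hx' : x ∈ l := by
        rcases List.mem_cons.mp hx with h1 | h1
        · exact absurd h1.symm hax
        · exact h1
      simp only [List.filter_cons, hq, h a hq, if_true, List.length_cons]
      exact Nat.succ_lt_succ (ih hx')
    · rcases hp : p a with _ | _
      · have hax : a ≠ x := fun he => by rw [he, hpx] at hp; exact absurd hp (by simp)
        have hx' : x ∈ l := by
          rcases List.mem_cons.mp hx with h1 | h1
          · exact absurd h1.symm hax
          · exact h1
        simp only [List.filter_cons, hp, hq, Bool.false_eq_true, if_false]
        exact ih hx'
      · have hle := pvFilterLenLe l p q h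
        simp only [List.filter_cons, hp, hq, Bool.false_eq_true, if_false, if_true,
          List.length_cons]
        omega

theorem pvKeyOfGet {g : List (Int × List Int)} {k : Int} {v : List Int}
    (h : (PySem.Dict.mk g).get? k = some v) : k ∈ g.map Prod.fst := by
  induction g with
  | nil => simp [PySem.Dict.get?] at h
  | cons p g ih =>
    rw [show (PySem.Dict.mk (p :: g)) = (PySem.Dict.mk ((p.1, p.2) :: g)) by rfl,
      PySem.Dict.get?_mk_cons] at h
    by_cases he : p.1 = k
    · simp [he]
    · simp only [show (p.1 == k) = false by simpa using he, Bool.false_eq_true, if_false] at h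
      simp [ih h]

theorem pvContainsAdd {s : PySem.Set Int} {x k : Int} (h : PySem.Set.contains s k = true) :
    PySem.Set.contains (PySem.Set.add s x) k = true := by
  rw [PySem.Set.contains_iff] at h ⊢
  exact (PySem.Set.mem_add _ _ _).mpr (Or.inl h)

theorem pvContainsAddSelf (s : PySem.Set Int) (x : Int) :
    PySem.Set.contains (PySem.Set.add s x) x = true := by
  rw [PySem.Set.contains_iff]
  exact (PySem.Set.mem_add _ _ _).mpr (Or.inr rfl)

theorem pvPredMono (visited : PySem.Set Int) (node : Int) :
    ∀ a, (!(PySem.Set.contains (PySem.Set.add visited node) a)) = true →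
      (!(PySem.Set.contains visited a)) = true := by
  intro a ha
  simp only [Bool.not_eq_eq_eq_not, Bool.not_true] at ha ⊢
  cases hc : PySem.Set.contains visited a
  · rfl
  · rw [pvContainsAdd hc] at ha
    exact absurd ha (by simp)

theorem pvPredSelf (visited : PySem.Set Int) (node : Int) :
    (!(PySem.Set.contains (PySem.Set.add visited node) node)) = false := by
  rw [pvContainsAddSelf]
  rfl

-- ===== PORT A =====
-- A's BFS loop: FIFO queue, early return when nodeB is popped, visited set updated
-- after the expansion test — exactly the body of A's while loop.
def bfsLoop (graph : List (Int × List Int)) (nodeB : Int) (queue : List Int)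
    (visited : PySem.Set Int) : Bool :=
  match queue with
  | [] => false
  | node :: rest =>
    if node = nodeB then true
    else if !(PySem.Set.contains visited node) then
      match _h : (PySem.Dict.mk graph).get? node with
      | some cs => bfsLoop graph nodeB (rest ++ cs) (PySem.Set.add visited node)
      | none => bfsLoop graph nodeB rest (PySem.Set.add visited node)
    else bfsLoop graph nodeB rest (PySem.Set.add visited node)
termination_by (((graph.map Prod.fst).filter (fun k => !(PySem.Set.contains visited k))).length, queue.length)
decreasing_by
  · exact Prod.Lex.left _ _ (pvFilterLenLt _ _ _ (pvPredMono visited node) node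
      (pvKeyOfGet _h) (by simpa using ‹(!(PySem.Set.contains visited node)) = true›)
      (pvPredSelf visited node))
  · rcases lt_or_eq_of_le (pvFilterLenLe ((graph.map Prod.fst)) _ _ (pvPredMono visited node))
      with h | h
    · exact Prod.Lex.left _ _ h
    · rw [h]; exact Prod.Lex.right _ (by simp)
  · rcases lt_or_eq_of_le (pvFilterLenLe ((graph.map Prod.fst)) _ _ (pvPredMono visited node))
      with h | h
    · exact Prod.Lex.left _ _ h
    · rw [h]; exact Prod.Lex.right _ (by simp)

def routeExistsBFS (graph : List (Int × List Int)) (nodeA : Int) (nodeB : Int) : Bool :=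
  bfsLoop graph nodeB [nodeA] (PySem.Set.ofList [])

-- ===== PORT B =====
-- the inner 'for child in graph[node]' loop: add each missing child, flag any change
def addChildren (cs : List Int) (S : PySem.Set Int) (changed : Bool) : PySem.Set Int × Bool :=
  match cs with
  | [] => (S, changed)
  | c :: cs' =>
    if PySem.Set.contains S c then addChildren cs' S changed
    else addChildren cs' (PySem.Set.add S c) true

-- one sweep 'for node in graph: if node in reachable: …' (graph[node] = first-match lookup)
def sweep (graph : List (Int × List Int)) (l : List (Int × List Int))
    (S : PySem.Set Int) (changed : Bool) : PySem.Set Int × Bool :=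
  match l with
  | [] => (S, changed)
  | p :: rest =>
    if PySem.Set.contains S p.1 then
      let r := addChildren ((PySem.Dict.mk graph).getD p.1 []) S changed
      sweep graph rest r.1 r.2
    else sweep graph rest S changed

-- every value a run can ever reach (start node, keys, children); used only by the
-- termination guard, which always holds on the calls the entry point makes
def pvUniverse (graph : List (Int × List Int)) (nodeA : Int) : List Int :=
  nodeA :: graph.flatMap (fun p => p.1 :: p.2)

-- the 'while changed' saturation loop
def satLoop (graph : List (Int × List Int)) (univ : List Int) (S : PySem.Set Int) :
    PySem.Set Int :=
  let r := sweep graph graph S false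
  if r.2 then
    if hguard : ((univ.filter (fun k => !(PySem.Set.contains r.1 k))).length
        < (univ.filter (fun k => !(PySem.Set.contains S k))).length) then
      satLoop graph univ r.1
    else r.1
  else r.1
termination_by (univ.filter (fun k => !(PySem.Set.contains S k))).length
decreasing_by exact hguard

def routeExistsBFS_alt (graph : List (Int × List Int)) (nodeA : Int) (nodeB : Int) : Bool :=
  PySem.Set.contains (satLoop graph (pvUniverse graph nodeA) (PySem.Set.ofList [nodeA])) nodeB

-- ===== PRECONDITION & SPEC =====
def Spec_routeExistsBFS (graph : List (Int × List Int)) (nodeA : Int) (nodeB : Int) (out : Bool) : Prop := out = routeExistsBFS_alt graph nodeA nodeB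
instance (graph : List (Int × List Int)) (nodeA : Int) (nodeB : Int) (out : Bool) : Decidable (Spec_routeExistsBFS graph nodeA nodeB out) := by unfold Spec_routeExistsBFS; infer_instance

-- ===== CLAIM (what is proved, stated in full; the proofs are below) =====
def Claim_equal_routeExistsBFS : Prop := ∀ (graph : List (Int × List Int)) (nodeA : Int) (nodeB : Int), Dom_routeExistsBFS graph nodeA nodeB → Spec_routeExistsBFS graph nodeA nodeB (routeExistsBFS graph nodeA nodeB)

-- ===== LEMMAS AND PROOFS =====

-- the edge relation of the graph dict
def pvEdge (graph : List (Int × List Int)) (a b : Int) : Prop :=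
  ∃ cs, (PySem.Dict.mk graph).get? a = some cs ∧ b ∈ cs

-- if a node of the visited set has a path to a target outside that set, some
-- unvisited node on the path lies on the worklist (A-side exit lemma)
theorem pvExit {graph : List (Int × List Int)} {queue : List Int} {visited : PySem.Set Int}
    {v t : Int}
    (I1 : ∀ w ∈ visited, ∀ c, pvEdge graph w c → c ∈ queue ∨ c ∈ visited)
    (hp : Relation.ReflTransGen (pvEdge graph) v t)
    (hv : v ∈ visited) (ht : t ∉ visited) :
    ∃ a ∈ queue, a ∉ visited ∧ Relation.ReflTransGen (pvEdge graph) a t := by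
  induction hp using Relation.ReflTransGen.head_induction_on with
  | refl => exact absurd hv ht
  | @head x c hedge hpath ih =>
    by_cases hc : c ∈ visited
    · exact ih hc
    · rcases I1 x hv c hedge with hq | hvis
      · exact ⟨c, hq, hc, hpath⟩
      · exact absurd hvis hc

theorem bfs_sound (graph : List (Int × List Int)) (nodeB : Int) (queue : List Int)
    (visited : PySem.Set Int) (h : bfsLoop graph nodeB queue visited = true) :
    ∃ a ∈ queue, Relation.ReflTransGen (pvEdge graph) a nodeB := by
  fun_induction bfsLoop graph nodeB queue visited with
  | case1 => simp at h
  | case2 visited rest => exact ⟨nodeB, by simp, Relation.ReflTransGen.refl⟩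
  | case3 visited node rest =>
    rename_i hne hnv cs hget ih
    rcases ih h with ⟨a, ha, hp⟩
    rcases List.mem_append.mp ha with h1 | h1
    · exact ⟨a, by simp [h1], hp⟩
    · exact ⟨node, by simp, Relation.ReflTransGen.head ⟨cs, hget, h1⟩ hp⟩
  | case4 visited node rest =>
    rename_i hne hnv hget ih
    rcases ih h with ⟨a, ha, hp⟩
    exact ⟨a, by simp [ha], hp⟩
  | case5 visited node =>
    rename_i rest hne hnv ih
    rcases ih h with ⟨a, ha, hp⟩
    exact ⟨a, by simp [ha], hp⟩

theorem bfs_complete (graph : List (Int × List Int)) (nodeB : Int) (queue : List Int)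
    (visited : PySem.Set Int) :
    (∀ w ∈ visited, ∀ c, pvEdge graph w c → c ∈ queue ∨ c ∈ visited) →
    nodeB ∉ visited →
    (∃ a ∈ queue, Relation.ReflTransGen (pvEdge graph) a nodeB) →
    bfsLoop graph nodeB queue visited = true := by
  fun_induction bfsLoop graph nodeB queue visited with
  | case1 =>
    rintro _ _ ⟨a, ha, _⟩
    simp at ha
  | case2 visited rest => intros; rfl
  | case3 visited node rest =>
    rename_i hne hnv cs hget ih
    intro I1 hB hw
    apply ih
    · intro w hw' c hedge
      rcases (PySem.Set.mem_add _ _ _).mp hw' with hwv | hwn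
      · rcases I1 w hwv c hedge with hq | hv
        · rcases List.mem_cons.mp hq with h1 | h1
          · exact Or.inr ((PySem.Set.mem_add _ _ _).mpr (Or.inr h1))
          · exact Or.inl (List.mem_append.mpr (Or.inl h1))
        · exact Or.inr ((PySem.Set.mem_add _ _ _).mpr (Or.inl hv))
      · rcases hedge with ⟨cs', hget', hc⟩
        rw [hwn, hget] at hget'
        exact Or.inl (List.mem_append.mpr (Or.inr (by injection hget' with he; rw [he]; exact hc)))
    · intro hB'
      rcases (PySem.Set.mem_add _ _ _).mp hB' with h1 | h1
      · exact hB h1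
      · exact hne h1.symm
    · rcases hw with ⟨a, ha, hp⟩
      rcases List.mem_cons.mp ha with rfl | h1
      · rcases (Relation.ReflTransGen.cases_head hp) with rfl | ⟨c, hedge, hp'⟩
        · exact absurd rfl hne
        · rcases hedge with ⟨cs', hget', hc⟩
          rw [hget] at hget'
          injection hget' with he
          subst he
          exact ⟨c, List.mem_append.mpr (Or.inr hc), hp'⟩
      · exact ⟨a, List.mem_append.mpr (Or.inl h1), hp⟩
  | case4 visited node rest =>
    rename_i hne hnv hget ih
    intro I1 hB hw
    apply ih
    · intro w hw' c hedge
      rcases (PySem.Set.mem_add _ _ _).mp hw' with hwv | hwn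
      · rcases I1 w hwv c hedge with hq | hv
        · rcases List.mem_cons.mp hq with h1 | h1
          · exact Or.inr ((PySem.Set.mem_add _ _ _).mpr (Or.inr h1))
          · exact Or.inl h1
        · exact Or.inr ((PySem.Set.mem_add _ _ _).mpr (Or.inl hv))
      · rcases hedge with ⟨cs', hget', hc⟩
        rw [hwn, hget] at hget'
        cases hget'
    · intro hB'
      rcases (PySem.Set.mem_add _ _ _).mp hB' with h1 | h1
      · exact hB h1
      · exact hne h1.symm
    · rcases hw with ⟨a, ha, hp⟩
      rcases List.mem_cons.mp ha with rfl | h1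
      · rcases (Relation.ReflTransGen.cases_head hp) with rfl | ⟨c, hedge, hp'⟩
        · exact absurd rfl hne
        · rcases hedge with ⟨cs', hget', hc⟩
          rw [hget] at hget'
          cases hget'
      · exact ⟨a, h1, hp⟩
  | case5 visited node =>
    rename_i rest hne hnv ih
    intro I1 hB hw
    have hmem : node ∈ visited := by
      rw [← PySem.Set.contains_iff]
      simpa using hnv
    rw [PySem.Set.add_of_mem hmem] at ih ⊢
    have I1' : ∀ w ∈ visited, ∀ c, pvEdge graph w c → c ∈ rest ∨ c ∈ visited := by
      intro w hw' c hedge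
      rcases I1 w hw' c hedge with hq | hv
      · rcases List.mem_cons.mp hq with rfl | h1
        · exact Or.inr hmem
        · exact Or.inl h1
      · exact Or.inr hv
    apply ih I1' hB
    rcases hw with ⟨a, ha, hp⟩
    rcases List.mem_cons.mp ha with rfl | h1
    · rcases pvExit I1' hp hmem hB with ⟨a', ha', _, hp'⟩
      exact ⟨a', ha', hp'⟩
    · exact ⟨a, h1, hp⟩

theorem pvGetMem {g : List (Int × List Int)} {k : Int} {v : List Int}
    (h : (PySem.Dict.mk g).get? k = some v) : (k, v) ∈ g := by
  induction g with
  | nil => simp [PySem.Dict.get?] at h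
  | cons p g ih =>
    rw [show (PySem.Dict.mk (p :: g)) = (PySem.Dict.mk ((p.1, p.2) :: g)) by rfl,
      PySem.Dict.get?_mk_cons] at h
    by_cases he : p.1 = k
    · simp only [show (p.1 == k) = true by simpa using he, if_true, Option.some_inj] at h
      rw [List.mem_cons]
      left
      rw [← he, ← h]
    · simp only [show (p.1 == k) = false by simpa using he, Bool.false_eq_true, if_false] at h
      exact List.mem_cons_of_mem _ (ih h)

-- ---- B-side lemmas ----

theorem addChildren_true (cs : List Int) : forall (S : PySem.Set Int), (addChildren cs S true).2 = true := by
  induction cs with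
  | nil => intro S; rfl
  | cons c cs' ih =>
    intro S
    simp only [addChildren]
    split <;> exact ih _

theorem addChildren_mono (cs : List Int) (S : PySem.Set Int) (ch : Bool) :
    forall x, x ∈ S → x ∈ (addChildren cs S ch).1 := by
  fun_induction addChildren cs S ch with
  | case1 => exact fun x hx => hx
  | case2 S ch c cs' hc ih => exact ih
  | case3 S ch c cs' hc ih =>
    exact fun x hx => ih x ((PySem.Set.mem_add _ _ _).mpr (Or.inl hx))

theorem addChildren_sub (cs : List Int) (S : PySem.Set Int) (ch : Bool) :
    forall x, x ∈ (addChildren cs S ch).1 → x ∈ S ∨ x ∈ cs := by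
  fun_induction addChildren cs S ch with
  | case1 => exact fun x hx => Or.inl hx
  | case2 S ch c cs' hc ih =>
    intro x hx
    rcases ih x hx with h | h
    · exact Or.inl h
    · exact Or.inr (by simp [h])
  | case3 S ch c cs' hc ih =>
    intro x hx
    rcases ih x hx with h | h
    · rcases (PySem.Set.mem_add _ _ _).mp h with h1 | rfl
      · exact Or.inl h1
      · exact Or.inr (by simp)
    · exact Or.inr (by simp [h])

theorem addChildren_new (cs : List Int) (S : PySem.Set Int) (ch : Bool) :
    (addChildren cs S ch).2 = true →
      ch = true ∨ ∃ c ∈ (addChildren cs S ch).1, c ∉ S := by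
  fun_induction addChildren cs S ch with
  | case1 => exact fun h => Or.inl h
  | case2 S ch c cs' hc ih =>
    intro h
    rcases ih h with h1 | ⟨c', hc', hn⟩
    · exact Or.inl h1
    · exact Or.inr ⟨c', hc', hn⟩
  | case3 S ch c cs' hc ih =>
    intro h
    refine Or.inr ⟨c, addChildren_mono _ _ _ c ((PySem.Set.mem_add _ _ _).mpr (Or.inr rfl)), ?_⟩
    exact fun hm => hc ((PySem.Set.contains_iff _ _).mpr hm)

theorem addChildren_false (cs : List Int) (S : PySem.Set Int) (ch : Bool) :
    (addChildren cs S ch).2 = false →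
      (addChildren cs S ch).1 = S ∧ ch = false ∧ ∀ c ∈ cs, c ∈ S := by
  fun_induction addChildren cs S ch with
  | case1 => exact fun h => ⟨rfl, h, by simp⟩
  | case2 S ch c cs' hc ih =>
    intro h
    rcases ih h with ⟨h1, h2, h3⟩
    refine ⟨h1, h2, ?_⟩
    intro c' hc'
    rcases List.mem_cons.mp hc' with rfl | hm
    · exact (PySem.Set.contains_iff _ _).mp hc
    · exact h3 c' hm
  | case3 S ch c cs' hc ih =>
    intro h
    rw [addChildren_true cs' (PySem.Set.add S c)] at h
    cases h

theorem addChildren_pres {R : Int → Prop} (cs : List Int) (S : PySem.Set Int) (ch : Bool)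
    (hS : ∀ x ∈ S, R x) (hcs : ∀ c ∈ cs, R c) : ∀ x ∈ (addChildren cs S ch).1, R x := by
  intro x hx
  rcases addChildren_sub cs S ch x hx with h | h
  · exact hS x h
  · exact hcs x h

theorem sweep_mono (graph l : List (Int × List Int)) (S : PySem.Set Int) (ch : Bool) :
    forall x, x ∈ S → x ∈ (sweep graph l S ch).1 := by
  fun_induction sweep graph l S ch with
  | case1 => exact fun x hx => hx
  | case2 S ch p rest hc r ih => exact fun x hx => ih x (addChildren_mono _ _ _ x hx)
  | case3 S ch p rest hc ih => exact ih

theorem sweep_pres {R : Int → Prop} (graph : List (Int × List Int))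
    (hR : ∀ v c, R v → pvEdge graph v c → R c) (l : List (Int × List Int))
    (S : PySem.Set Int) (ch : Bool) :
    (∀ x ∈ S, R x) → ∀ x ∈ (sweep graph l S ch).1, R x := by
  fun_induction sweep graph l S ch with
  | case1 => exact fun hS => hS
  | case2 S ch p rest hc r ih =>
    intro hS
    apply ih
    apply addChildren_pres _ _ _ hS
    intro c hcm
    rcases hg : (PySem.Dict.mk graph).get? p.1 with _ | cs
    · rw [PySem.Dict.getD_eq_get?_getD, hg] at hcm
      simp at hcm
    · rw [PySem.Dict.getD_eq_get?_getD, hg] at hcm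
      exact hR p.1 c (hS p.1 ((PySem.Set.contains_iff _ _).mp hc)) ⟨cs, hg, hcm⟩
  | case3 S ch p rest hc ih => exact ih

theorem sweep_new (graph l : List (Int × List Int)) (S : PySem.Set Int) (ch : Bool) :
    (sweep graph l S ch).2 = true →
      ch = true ∨ ∃ c ∈ (sweep graph l S ch).1, c ∉ S := by
  fun_induction sweep graph l S ch with
  | case1 => exact fun h => Or.inl h
  | case2 S ch p rest hc r ih =>
    intro h
    rcases ih h with h1 | ⟨c, hcm, hn⟩
    · rcases addChildren_new _ _ _ h1 with h2 | ⟨c, hcm, hn⟩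
      · exact Or.inl h2
      · exact Or.inr ⟨c, sweep_mono _ _ _ _ c hcm, hn⟩
    · exact Or.inr ⟨c, hcm, fun hcS => hn (addChildren_mono _ _ _ c hcS)⟩
  | case3 S ch p rest hc ih =>
    intro h
    rcases ih h with h1 | ⟨c, hcm, hn⟩
    · exact Or.inl h1
    · exact Or.inr ⟨c, hcm, hn⟩

theorem sweep_false (graph l : List (Int × List Int)) (S : PySem.Set Int) (ch : Bool) :
    (sweep graph l S ch).2 = false →
      (sweep graph l S ch).1 = S ∧ ch = false ∧
        ∀ p ∈ l, p.1 ∈ S → ∀ c ∈ (PySem.Dict.mk graph).getD p.1 [], c ∈ S := by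
  fun_induction sweep graph l S ch with
  | case1 => exact fun h => ⟨rfl, h, by simp⟩
  | case2 S ch p rest hc r ih =>
    intro h
    rcases ih h with ⟨h1, h2, h3⟩
    rcases addChildren_false _ _ _ h2 with ⟨g1, g2, g3⟩
    have g1' : r.1 = S := g1
    rw [g1'] at h1 h3 ⊢
    refine ⟨h1, g2, ?_⟩
    intro q hq hq1 c hcm
    rcases List.mem_cons.mp hq with rfl | hm
    · exact g3 c hcm
    · exact h3 q hm hq1 c hcm
  | case3 S ch p rest hc ih =>
    intro h
    rcases ih h with ⟨h1, h2, h3⟩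
    refine ⟨h1, h2, ?_⟩
    intro q hq hq1 c hcm
    rcases List.mem_cons.mp hq with rfl | hm
    · exact absurd ((PySem.Set.contains_iff _ _).mpr hq1) hc
    · exact h3 q hm hq1 c hcm

theorem sweep_univ (graph : List (Int × List Int)) {univ : List Int}
    (hU : ∀ a cs, (PySem.Dict.mk graph).get? a = some cs → ∀ c ∈ cs, c ∈ univ)
    (l : List (Int × List Int)) (S : PySem.Set Int) (ch : Bool) :
    (∀ x ∈ S, x ∈ univ) → ∀ x ∈ (sweep graph l S ch).1, x ∈ univ := by
  fun_induction sweep graph l S ch with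
  | case1 => exact fun hS => hS
  | case2 S ch p rest hc r ih =>
    intro hS
    apply ih
    apply addChildren_pres _ _ _ hS
    intro c hcm
    rcases hg : (PySem.Dict.mk graph).get? p.1 with _ | cs
    · rw [PySem.Dict.getD_eq_get?_getD, hg] at hcm
      simp at hcm
    · rw [PySem.Dict.getD_eq_get?_getD, hg] at hcm
      exact hU p.1 cs hg c hcm
  | case3 S ch p rest hc ih => exact ih

theorem satLoop_mono (graph : List (Int × List Int)) (univ : List Int) (S : PySem.Set Int) :
    forall x, x ∈ S → x ∈ satLoop graph univ S := by
  fun_induction satLoop graph univ S with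
  | case1 S r h2 hlt ih => exact fun x hx => ih x (sweep_mono graph graph S false x hx)
  | case2 S r h2 hnlt => exact fun x hx => sweep_mono graph graph S false x hx
  | case3 S r hn => exact fun x hx => sweep_mono graph graph S false x hx

theorem satLoop_pres {R : Int → Prop} (graph : List (Int × List Int))
    (hR : ∀ v c, R v → pvEdge graph v c → R c) (univ : List Int) (S : PySem.Set Int) :
    (∀ x ∈ S, R x) → ∀ x ∈ satLoop graph univ S, R x := by
  fun_induction satLoop graph univ S with
  | case1 S r h2 hlt ih => exact fun hS => ih (sweep_pres graph hR graph S false hS)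
  | case2 S r h2 hnlt => exact fun hS => sweep_pres graph hR graph S false hS
  | case3 S r hn => exact fun hS => sweep_pres graph hR graph S false hS

-- the guard-fail branch is unreachable when S lies in univ and univ covers all children
theorem satLoop_closed (graph : List (Int × List Int)) {univ : List Int}
    (hU : ∀ a cs, (PySem.Dict.mk graph).get? a = some cs → ∀ c ∈ cs, c ∈ univ)
    (S : PySem.Set Int) :
    (∀ x ∈ S, x ∈ univ) →
      ∀ v c, v ∈ satLoop graph univ S → pvEdge graph v c → c ∈ satLoop graph univ S := by
  fun_induction satLoop graph univ S with
  | case1 S r h2 hlt ih =>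
    exact fun hS => ih (sweep_univ graph hU graph S false hS)
  | case2 S r h2 hnlt =>
    intro hS
    -- the sweep changed something yet the measure did not drop: contradiction
    exfalso
    apply hnlt
    rcases sweep_new graph graph S false h2 with h1 | ⟨c, hcm, hn⟩
    · cases h1
    · refine pvFilterLenLt univ _ _ ?_ c (sweep_univ graph hU graph S false hS c hcm) ?_ ?_
      · intro a ha
        simp only [Bool.not_eq_eq_eq_not, Bool.not_true] at ha ⊢
        cases hc : PySem.Set.contains S a
        · rfl
        · have hm : a ∈ (sweep graph graph S false).1 :=
            sweep_mono graph graph S false a ((PySem.Set.contains_iff _ _).mp hc)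
          rw [(PySem.Set.contains_iff _ _).mpr hm] at ha
          exact absurd ha (by simp)
      · simp only [Bool.not_eq_eq_eq_not, Bool.not_true]
        cases hc : PySem.Set.contains S c
        · rfl
        · exact absurd ((PySem.Set.contains_iff _ _).mp hc) hn
      · rw [(PySem.Set.contains_iff _ _).mpr hcm]
        rfl
  | case3 S r hn =>
    intro hS v c hv hedge
    rcases sweep_false graph graph S false (by simpa using hn) with ⟨h1, _, h3⟩
    have hv' : v ∈ S := by rw [← h1]; exact hv
    show c ∈ (sweep graph graph S false).1
    rw [h1]
    rcases hedge with ⟨cs, hg, hcm⟩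
    apply h3 (v, cs) (pvGetMem hg) hv' c
    rw [PySem.Dict.getD_eq_get?_getD, hg]
    exact hcm

theorem pvB_iff (graph : List (Int × List Int)) (nodeA nodeB : Int) :
    routeExistsBFS_alt graph nodeA nodeB = true ↔
      Relation.ReflTransGen (pvEdge graph) nodeA nodeB := by
  unfold routeExistsBFS_alt
  rw [PySem.Set.contains_iff]
  have hU : ∀ a cs, (PySem.Dict.mk graph).get? a = some cs →
      ∀ c ∈ cs, c ∈ pvUniverse graph nodeA := by
    intro a cs hg c hcm
    have := pvGetMem hg
    simp only [pvUniverse, List.mem_cons, List.mem_flatMap]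
    exact Or.inr ⟨(a, cs), this, by simp [hcm]⟩
  have hS : ∀ x ∈ PySem.Set.ofList [nodeA], x ∈ pvUniverse graph nodeA := by
    intro x hx
    rw [show x = nodeA by simpa using (PySem.Set.mem_ofList _ _).mp hx]
    simp [pvUniverse]
  constructor
  · intro h
    refine satLoop_pres (R := fun x => Relation.ReflTransGen (pvEdge graph) nodeA x)
      graph (fun v c hv he => Relation.ReflTransGen.tail hv he) _ _ ?_ nodeB h
    intro x hx
    rw [show x = nodeA by simpa using (PySem.Set.mem_ofList _ _).mp hx]
  · intro hp
    induction hp with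
    | refl => exact satLoop_mono _ _ _ nodeA ((PySem.Set.mem_ofList _ _).mpr (by simp))
    | tail hstep hedge ih => exact satLoop_closed graph hU _ hS _ _ ih hedge

theorem pvA_iff (graph : List (Int × List Int)) (nodeA nodeB : Int) :
    routeExistsBFS graph nodeA nodeB = true ↔
      Relation.ReflTransGen (pvEdge graph) nodeA nodeB := by
  unfold routeExistsBFS
  constructor
  · intro h
    rcases bfs_sound graph nodeB [nodeA] _ h with ⟨a, ha, hp⟩
    rw [show a = nodeA by simpa using ha] at hp
    exact hp
  · intro hp
    apply bfs_complete
    · intro w hw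
      simp at hw
    · intro hB
      simp at hB
    · exact ⟨nodeA, by simp, hp⟩

-- ===== VERDICT (by name: the statement is the Claim_ definition above) =====
theorem routeExistsBFS_spec : Claim_equal_routeExistsBFS := by
  intro graph nodeA nodeB _
  unfold Spec_routeExistsBFS
  rw [Bool.eq_iff_iff]
  exact (pvA_iff graph nodeA nodeB).trans (pvB_iff graph nodeA nodeB).symm
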